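-- pv_equiv track=rewrite | github.com/SunPengChuan/karyotype-phylogenomics-simulator | fission/ancestor_reconstruction.py | _find_contiguous_block
-- ===== SOURCE A (Python) =====
-- def _find_contiguous_block(genes, subset):
--     subset_set = set(subset)
--     block_start = None
--     for i, g in enumerate(genes):
--         if g in subset_set:
--             if block_start is None:
--                 block_start = i
--         else:
--             if block_start is not None:
--                 block = genes[block_start:i]
--                 if set(block) == subset_set:
--                     return block
--                 block_start = None
--     if block_start is not None:
--         block = genes[block_start:]
--         if set(block) == subset_set:
--             return block
--     return None
-- ===== SOURCE B (Python) =====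
-- def _find_contiguous_block(genes, subset):
--     s = set(subset)
--     rest = genes
--     while True:
--         # drop the prefix of non-members, then span off the maximal member run
--         k = next((i for i, g in enumerate(rest) if g in s), len(rest))
--         rest = rest[k:]
--         if not rest:
--             return None
--         j = next((i for i, g in enumerate(rest) if g not in s), len(rest))
--         block = rest[:j]
--         if set(block) == s:
--             return block
--         rest = rest[j:]
-- ===== Notes on version B (the rewrite author's own statement) =====
-- stated objective: alternative
-- what changed: A's single scan with a block_start index state machine (slicing genes[block_start:i] when a run ends) is replaced by a suffix decomposition: repeatedly drop the leading non-members, span off the maximal member run, test it against the subset, and continue on the remaining tail.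
import Mathlib
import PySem

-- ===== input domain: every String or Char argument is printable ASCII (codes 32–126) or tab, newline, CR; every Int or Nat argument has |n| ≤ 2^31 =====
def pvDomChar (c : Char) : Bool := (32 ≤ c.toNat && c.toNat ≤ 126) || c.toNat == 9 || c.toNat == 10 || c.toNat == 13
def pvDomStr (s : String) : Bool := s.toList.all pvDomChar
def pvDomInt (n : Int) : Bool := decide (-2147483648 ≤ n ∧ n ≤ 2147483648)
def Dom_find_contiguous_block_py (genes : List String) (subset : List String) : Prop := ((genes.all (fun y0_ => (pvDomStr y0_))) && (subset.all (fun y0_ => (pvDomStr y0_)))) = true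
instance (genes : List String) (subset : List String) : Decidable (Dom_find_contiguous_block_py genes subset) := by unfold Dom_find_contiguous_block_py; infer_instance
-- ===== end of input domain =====

-- B replaces A's index state machine (block_start, slicing genes[b:i]) by a suffix-based
-- drop-nonmembers / span-members decomposition; objective: alternative (same cost).

-- ===== PORT A =====
-- the for-loop over enumerate(genes) with state block_start : Option Nat; early return kept
def fcbLoopA (genes : List String) (ss : PySem.Set String) :
    List String → Nat → Option Nat → Option (List String)
  | [], _, bs =>
    match bs with
    | some b =>
      let block := PySem.List.slice genes (some (b : Int)) none   -- genes[block_start:]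
      if PySem.Set.equal (PySem.Set.ofList block) ss then some block else none
    | none => none
  | g :: rest, i, bs =>
    if PySem.Set.contains ss g then
      fcbLoopA genes ss rest (i + 1) (match bs with | none => some i | some b => some b)
    else
      match bs with
      | some b =>
        let block := PySem.List.slice genes (some (b : Int)) (some (i : Int))  -- genes[block_start:i]
        if PySem.Set.equal (PySem.Set.ofList block) ss then some block
        else fcbLoopA genes ss rest (i + 1) none
      | none => fcbLoopA genes ss rest (i + 1) none

def find_contiguous_block_py (genes : List String) (subset : List String) : Option (List String) :=
  fcbLoopA genes (PySem.Set.ofList subset) genes 0 none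

-- ===== PORT B =====
-- Source B's while-loop: drop leading non-members, span off the member run, check, recurse on the tail
def fcbGoB (ss : PySem.Set String) (rest : List String) : Option (List String) :=
  match h : rest.dropWhile (fun g => !(PySem.Set.contains ss g)) with
  | [] => none
  | x :: t =>
    let block := (x :: t).takeWhile (fun g => PySem.Set.contains ss g)
    if PySem.Set.equal (PySem.Set.ofList block) ss then some block
    else fcbGoB ss ((x :: t).dropWhile (fun g => PySem.Set.contains ss g))
termination_by rest.length
decreasing_by
  have hx : PySem.Set.contains ss x = true := by
    have := List.head_dropWhile_not (p := fun g => !(PySem.Set.contains ss g)) (l := rest)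
      (by rw [h]; simp)
    simp only [h] at this
    simpa using this
  have h1 := List.length_dropWhile_le (fun g => !(PySem.Set.contains ss g)) rest
  rw [h] at h1
  have h2 : ((x :: t).dropWhile (fun g => PySem.Set.contains ss g)).length ≤ t.length := by
    rw [List.dropWhile_cons_of_pos (by simpa using hx)]
    exact List.length_dropWhile_le _ t
  simp at h1
  omega

def find_contiguous_block_py_alt (genes : List String) (subset : List String) : Option (List String) :=
  fcbGoB (PySem.Set.ofList subset) genes

-- ===== PRECONDITION & SPEC =====
def Spec_find_contiguous_block_py (genes : List String) (subset : List String) (out : Option (List String)) : Prop := out = find_contiguous_block_py_alt genes subset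
instance (genes : List String) (subset : List String) (out : Option (List String)) : Decidable (Spec_find_contiguous_block_py genes subset out) := by unfold Spec_find_contiguous_block_py; infer_instance

-- ===== CLAIM (what is proved, stated in full; the proofs are below) =====
def Claim_equal_find_contiguous_block_py : Prop := ∀ (genes : List String) (subset : List String), Dom_find_contiguous_block_py genes subset → Spec_find_contiguous_block_py genes subset (find_contiguous_block_py genes subset)

-- ===== LEMMAS AND PROOFS =====

-- skipping a non-member at the head does not change B's result
lemma fcbGoB_cons_neg (ss : PySem.Set String) (g : String) (rs : List String)
    (hg : PySem.Set.contains ss g = false) : fcbGoB ss (g :: rs) = fcbGoB ss rs := by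
  have hD : List.dropWhile (fun g => !(PySem.Set.contains ss g)) (g :: rs)
      = List.dropWhile (fun g => !(PySem.Set.contains ss g)) rs :=
    List.dropWhile_cons_of_pos (by simpa using hg)
  rw [fcbGoB.eq_def, fcbGoB.eq_def, hD]

-- combined invariant: A's loop in state none / some agrees with B's suffix recursion
lemma fcbLoop_eq (ss : PySem.Set String) :
    ∀ n (rest : List String), rest.length ≤ n →
      (∀ (genes : List String) (i : Nat), genes.drop i = rest →
        fcbLoopA genes ss rest i none = fcbGoB ss rest) ∧
      (∀ (genes pre : List String) (b : Nat), pre ≠ [] →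
          (∀ g ∈ pre, PySem.Set.contains ss g = true) → genes.drop b = pre ++ rest →
        fcbLoopA genes ss rest (b + pre.length) (some b) =
          (if PySem.Set.equal (PySem.Set.ofList
                (pre ++ rest.takeWhile (fun g => PySem.Set.contains ss g))) ss then
             some (pre ++ rest.takeWhile (fun g => PySem.Set.contains ss g))
           else fcbGoB ss (rest.dropWhile (fun g => PySem.Set.contains ss g)))) := by
  intro n
  induction n with
  | zero =>
    intro rest hlen
    have hnil : rest = [] := List.eq_nil_of_length_eq_zero (by omega)
    subst hnil
    exact ⟨fun genes i hdrop => by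
        rw [fcbGoB.eq_def]; simp [fcbLoopA],
      fun genes pre b hne hmem hdrop => by
        rw [fcbGoB.eq_def]
        simp only [List.append_nil] at hdrop
        simp only [fcbLoopA]
        rw [PySem.List.slice_from_natCast, hdrop]
        simp only [List.takeWhile_nil, List.append_nil, List.dropWhile_nil]⟩
  | succ n ih =>
    intro rest hlen
    match rest with
    | [] =>
      exact ⟨fun genes i hdrop => by
          rw [fcbGoB.eq_def]; simp [fcbLoopA],
        fun genes pre b hne hmem hdrop => by
          rw [fcbGoB.eq_def]
          simp only [List.append_nil] at hdrop
          simp only [fcbLoopA]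
          rw [PySem.List.slice_from_natCast, hdrop]
          simp only [List.takeWhile_nil, List.append_nil, List.dropWhile_nil]⟩
    | g :: rs =>
      have hrs : rs.length ≤ n := by simp at hlen; omega
      obtain ⟨ihN, ihS⟩ := ih rs hrs
      constructor
      · -- none state
        intro genes i hdrop
        have hdrop' : genes.drop (i + 1) = rs := by
          have := congrArg (List.drop 1) hdrop
          simpa [List.drop_drop, Nat.add_comm] using this
        by_cases hg : PySem.Set.contains ss g = true
        · have hL : fcbLoopA genes ss (g :: rs) i none
              = fcbLoopA genes ss rs (i + 1) (some i) := by
            simp only [fcbLoopA]; rw [if_pos hg]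
          have hStep := ihS genes [g] i (by simp)
            (by intro x hx; simp at hx; subst hx; exact hg) (by simpa using hdrop)
          simp only [List.length_cons, List.length_nil] at hStep
          rw [hL, hStep]
          rw [fcbGoB.eq_def ss (g :: rs)]
          have hD : List.dropWhile (fun g => !(PySem.Set.contains ss g)) (g :: rs)
              = g :: rs := List.dropWhile_cons_of_neg (by simpa using hg)
          rw [hD]
          simp only [List.singleton_append, List.takeWhile_cons_of_pos hg,
            List.dropWhile_cons_of_pos hg]
        · have hgf : PySem.Set.contains ss g = false := by simpa using hg
          have hL : fcbLoopA genes ss (g :: rs) i none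
              = fcbLoopA genes ss rs (i + 1) none := by
            simp only [fcbLoopA]; rw [if_neg (by simpa using hgf)]
          rw [hL, ihN genes (i + 1) hdrop', fcbGoB_cons_neg ss g rs hgf]
      · -- some state
        intro genes pre b hne hmem hdrop
        by_cases hg : PySem.Set.contains ss g = true
        · have hL : fcbLoopA genes ss (g :: rs) (b + pre.length) (some b)
              = fcbLoopA genes ss rs (b + pre.length + 1) (some b) := by
            simp only [fcbLoopA]; rw [if_pos hg]
          have hStep := ihS genes (pre ++ [g]) b (by simp)
            (by intro x hx; simp at hx
                rcases hx with hx | hx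
                · exact hmem x hx
                · subst hx; exact hg)
            (by rw [hdrop]; simp)
          have hlen' : b + (pre ++ [g]).length = b + pre.length + 1 := by
            simp [Nat.add_assoc]
          rw [hlen'] at hStep
          rw [hL, hStep]
          have hT : List.takeWhile (fun g => PySem.Set.contains ss g) (g :: rs)
              = g :: rs.takeWhile (fun g => PySem.Set.contains ss g) :=
            List.takeWhile_cons_of_pos hg
          have hW : List.dropWhile (fun g => PySem.Set.contains ss g) (g :: rs)
              = rs.dropWhile (fun g => PySem.Set.contains ss g) :=
            List.dropWhile_cons_of_pos hg
          rw [hT, hW, List.append_assoc, List.singleton_append]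
        · have hgf : PySem.Set.contains ss g = false := by simpa using hg
          have hblock : PySem.List.slice genes (some (b : Int)) (some ((b + pre.length : Nat) : Int))
              = pre := by
            rw [PySem.List.slice_natCast, hdrop]
            simp [List.take_left']
          have h1 : genes.drop (b + pre.length) = g :: rs := by
            have := congrArg (List.drop pre.length) hdrop
            simpa [List.drop_drop, Nat.add_comm, List.drop_left] using this
          have hdrop2 : genes.drop (b + pre.length + 1) = rs := by
            have := congrArg (List.drop 1) h1
            simpa [List.drop_drop, Nat.add_comm] using this
          have hL : fcbLoopA genes ss (g :: rs) (b + pre.length) (some b)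
              = (if PySem.Set.equal (PySem.Set.ofList pre) ss then some pre
                 else fcbLoopA genes ss rs (b + pre.length + 1) none) := by
            simp only [fcbLoopA]; rw [if_neg (by simpa using hgf)]
            rw [hblock]
          rw [hL, ihN genes (b + pre.length + 1) hdrop2]
          have hT : List.takeWhile (fun g => PySem.Set.contains ss g) (g :: rs) = [] :=
            List.takeWhile_cons_of_neg (by simpa using hgf)
          have hW : List.dropWhile (fun g => PySem.Set.contains ss g) (g :: rs) = g :: rs :=
            List.dropWhile_cons_of_neg (by simpa using hgf)
          rw [hT, hW, fcbGoB_cons_neg ss g rs hgf, List.append_nil]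

-- ===== VERDICT (by name: the statement is the Claim_ definition above) =====
theorem find_contiguous_block_py_spec : Claim_equal_find_contiguous_block_py := by
  intro genes subset _
  unfold Spec_find_contiguous_block_py find_contiguous_block_py find_contiguous_block_py_alt
  exact ((fcbLoop_eq (PySem.Set.ofList subset) genes.length genes le_rfl).1 genes 0 (by simp))
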